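-- pv_equiv track=rewrite | github.com/ladyllg/PagingAlgorithms | main.py | _page_faults_by_SC
-- ===== SOURCE A (Python) =====
-- def _find_and_update(current_page, ram, second_chance_array, frames):
--     for i in range(frames):
--         if ram[i] == current_page:
--             # Se página já está na RAM, recebe uma segunda chance
--             second_chance_array[i] = 1
--             return True # Significa que foi acessado uma página que ja existe e não é preciso substituir nenhuma page frame
--     return False # Signica que a página que esta sendo acessada ainda não existe na RAM
--
-- def _replace_and_update(page, ram, second_chance, frames, pointer):
--     while(True):
--         if not second_chance[pointer]: # Caso não é a segunda chance daquela página apontada para ser removida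
--             ram[pointer] = page # Aloca no page frame apontado a nova página
--             return (pointer + 1) % frames # Retorna o ponteiro atualizado
--
--         # Marca-se a page frame com False
--         # Significa que aquela pagina vai ser substituida no proximo ciclo, a não ser que seja acessada novamente
--         second_chance[pointer] = 0
--         pointer = (pointer + 1) % frames # Atualiza o ponteiro
--
-- def _page_faults_by_SC(reference_string, number_pages, frames):
--     pointer = 0 # Posição na RAM que referencia a pagina a ser removida
--     page_faults = 0
--     ram = [-1]*frames # Vetor que representa a RAM (page frames) preenchido com -1 que significa que páginas ainda não foram alocadas
--     second_chance_array = [0]*frames # Vetor que vai servir para controlar a chance atual de cada page frame na RAM ( 0 -> False, 1 -> True)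
--
--     for i in range(number_pages):
--         current_page = reference_string[i]
--         # Primeiro, a função auxiliar verifica que a página atual já existe na RAM
--         if not _find_and_update(current_page,ram,second_chance_array,frames):
--             # Caso não, a página atual é inserida
--             # Para isso, a função auxiliar _replace_and_update vai encontrar uma página para ser removida
--             pointer = _replace_and_update(current_page,ram,second_chance_array,frames,pointer)
--             page_faults += 1
--
--     return page_faults
-- ===== SOURCE B (Python) =====
-- def _page_faults_by_SC(reference_string, number_pages, frames):
--     # Second-chance clock kept as a rotating queue of [page, referenced] cells;
--     # the front cell is the next eviction candidate.  Free frames hold the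
--     # pseudo-page -1 with a clear bit, so they are consumed first, in order.
--     queue = [[-1, 0] for _ in range(frames)]
--     page_faults = 0
--     for page in reference_string[:max(0, number_pages)]:
--         for cell in queue:
--             if cell[0] == page:
--                 cell[1] = 1
--                 break
--         else:
--             while True:
--                 victim, referenced = queue.pop(0)
--                 if not referenced:
--                     break
--                 queue.append([victim, 0])
--             queue.append([page, 0])
--             page_faults += 1
--     return page_faults
-- ===== Notes on version B (the rewrite author's own statement) =====
-- stated objective: alternative
-- what changed: Replaces A's parallel ram/second-chance arrays with a modular clock pointer and three index-arithmetic helpers by a single rotating queue of (page, referenced) cells popped/rotated in place; Pre_ excludes inputs where A raises IndexError (frames <= 0 or number_pages > len(reference_string), with number_pages > 0) and reference prefixes containing -1, A's internal free-frame marker, which is outside the natural domain of page numbers and on which which of the duplicate marker cells gets the referenced bit is accidental.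
-- outside the precondition, e.g. on _page_faults_by_SC([-1, 0, -1, 2, -1, 1, 0], 7, 4): A returns 3, B returns 4; on _page_faults_by_SC([-1], 1, 2): A returns 0, B returns 0
import Mathlib
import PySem

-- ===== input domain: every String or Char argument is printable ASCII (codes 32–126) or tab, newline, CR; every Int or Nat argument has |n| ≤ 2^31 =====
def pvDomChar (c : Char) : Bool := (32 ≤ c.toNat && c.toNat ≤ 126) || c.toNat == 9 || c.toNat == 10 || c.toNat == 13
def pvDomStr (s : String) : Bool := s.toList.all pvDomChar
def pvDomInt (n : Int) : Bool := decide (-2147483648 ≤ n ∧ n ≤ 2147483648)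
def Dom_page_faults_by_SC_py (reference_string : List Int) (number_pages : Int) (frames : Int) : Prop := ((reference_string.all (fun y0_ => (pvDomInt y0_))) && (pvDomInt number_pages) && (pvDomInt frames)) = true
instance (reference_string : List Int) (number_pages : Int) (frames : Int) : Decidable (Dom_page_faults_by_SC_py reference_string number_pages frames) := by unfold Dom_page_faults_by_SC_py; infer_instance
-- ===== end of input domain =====

-- B replaces A's parallel ram/second-chance arrays with a modular clock pointer by a
-- single rotating queue of (page, referenced) cells; objective: alternative
-- (a different data structure of similar cost).

-- ===== PORT A =====
-- for i in range(frames): if ram[i] == current_page: second_chance_array[i] = 1; return True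
def pvFindA (p : Int) (ram : List Int) (sc : List Int) : List Nat → Bool × List Int
  | [] => (false, sc)
  | i :: rest =>
    if PySem.List.pyGetD ram (i : Int) 0 == p then (true, sc.set i 1)
    else pvFindA p ram sc rest

-- while True: … (fuel makes the loop total; under Pre_ the fuel frames+1 is never exhausted)
def pvReplaceA (page : Int) (frames : Int) : List Int → List Int → Int → Nat → List Int × List Int × Int
  | ram, sc, pointer, 0 => (ram, sc, pointer)
  | ram, sc, pointer, fuel + 1 =>
    if PySem.List.pyGetD sc pointer 0 == 0 then
      (ram.set pointer.toNat page, sc, PySem.Int.mod (pointer + 1) frames)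
    else
      pvReplaceA page frames ram (sc.set pointer.toNat 0) (PySem.Int.mod (pointer + 1) frames) fuel

-- for i in range(number_pages): …
def pvLoopA (ref : List Int) (frames : Int) : List Nat → List Int → List Int → Int → Int → Int
  | [], _, _, _, faults => faults
  | i :: rest, ram, sc, ptr, faults =>
    let p := PySem.List.pyGetD ref (i : Int) 0
    let fr := pvFindA p ram sc (List.range frames.toNat)
    if fr.1 then pvLoopA ref frames rest ram fr.2 ptr faults
    else
      let r := pvReplaceA p frames ram fr.2 ptr (frames.toNat + 1)
      pvLoopA ref frames rest r.1 r.2.1 r.2.2 (faults + 1)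

def page_faults_by_SC_py (reference_string : List Int) (number_pages : Int) (frames : Int) : Int :=
  pvLoopA reference_string frames (List.range number_pages.toNat)
    (List.replicate frames.toNat (-1)) (List.replicate frames.toNat 0) 0 0

-- ===== PORT B =====
-- for cell in queue: if cell[0] == page: cell[1] = 1; break / else: …
def pvHitB (p : Int) : List (Int × Int) → Bool × List (Int × Int)
  | [] => (false, [])
  | c :: t =>
    if c.1 == p then (true, (c.1, 1) :: t)
    else
      let r := pvHitB p t
      (r.1, c :: r.2)

-- while True: victim, referenced = queue.pop(0) … (fuel totalises; never exhausted under Pre_)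
def pvEvictB : List (Int × Int) → Nat → List (Int × Int)
  | q, 0 => q
  | [], _ + 1 => []
  | c :: q, fuel + 1 =>
    if c.2 == 0 then q else pvEvictB (q ++ [(c.1, 0)]) fuel

def pvLoopB (frames : Int) : List Int → List (Int × Int) → Int → Int
  | [], _, faults => faults
  | p :: rest, q, faults =>
    let r := pvHitB p q
    if r.1 then pvLoopB frames rest r.2 faults
    else pvLoopB frames rest (pvEvictB r.2 (frames.toNat + 1) ++ [(p, 0)]) (faults + 1)

def page_faults_by_SC_py_alt (reference_string : List Int) (number_pages : Int) (frames : Int) : Int :=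
  pvLoopB frames (PySem.List.slice reference_string none (some (max 0 number_pages)))
    (List.replicate frames.toNat ((-1 : Int), (0 : Int))) 0

-- ===== PRECONDITION & SPEC =====
-- Pre_ excludes inputs where A raises IndexError (0 < number_pages together with frames ≤ 0 or
-- number_pages > len(reference_string)) and reference prefixes containing -1, A's internal
-- free-frame marker, which is outside the natural domain of page numbers and on which which
-- of the duplicate marker cells gets the referenced bit is accidental.
def Pre_page_faults_by_SC_py (reference_string : List Int) (number_pages : Int) (frames : Int) : Prop :=
  number_pages ≤ 0 ∨ (number_pages ≤ (reference_string.length : Int) ∧ 1 ≤ frames ∧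
    ∀ x ∈ reference_string.take number_pages.toNat, x ≠ -1)
instance (reference_string : List Int) (number_pages : Int) (frames : Int) : Decidable (Pre_page_faults_by_SC_py reference_string number_pages frames) := by unfold Pre_page_faults_by_SC_py; infer_instance

def pvWitness_page_faults_by_SC_py : List Int × Int × Int := ([1, 2, 1, 3, 2], 5, 2)

def Spec_page_faults_by_SC_py (reference_string : List Int) (number_pages : Int) (frames : Int) (out : Int) : Prop := out = page_faults_by_SC_py_alt reference_string number_pages frames
instance (reference_string : List Int) (number_pages : Int) (frames : Int) (out : Int) : Decidable (Spec_page_faults_by_SC_py reference_string number_pages frames out) := by unfold Spec_page_faults_by_SC_py; infer_instance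

-- ===== CLAIM (what is proved, stated in full; the proofs are below) =====
def Claim_equal_page_faults_by_SC_py : Prop := ∀ (reference_string : List Int) (number_pages : Int) (frames : Int), Dom_page_faults_by_SC_py reference_string number_pages frames → Pre_page_faults_by_SC_py reference_string number_pages frames → Spec_page_faults_by_SC_py reference_string number_pages frames (page_faults_by_SC_py reference_string number_pages frames)

-- ===== LEMMAS AND PROOFS =====

-- A's parallel arrays seen as B's cell list: cell s is (ram[s], sc[s])
theorem findA_range' (p : Int) (ram : List Int) :
    ∀ (m k : Nat) (sc : List Int), k + m = ram.length →
    pvFindA p ram sc (List.range' k m) =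
      match (ram.drop k).findIdx? (fun x => x == p) with
      | some j => (true, sc.set (k + j) 1)
      | none => (false, sc) := by
  intro m
  induction m with
  | zero =>
    intro k sc hk
    have hd : ram.drop k = [] := List.drop_eq_nil_of_le (by omega)
    simp [pvFindA, hd]
  | succ m ih =>
    intro k sc hk
    have hk' : k < ram.length := by omega
    have hdrop : ram.drop k = ram[k] :: ram.drop (k + 1) := (List.getElem_cons_drop hk').symm
    have hget : PySem.List.pyGetD ram (k : Int) 0 = ram[k] := by
      simp [PySem.List.pyGetD_natCast, List.getD, List.getElem?_eq_getElem hk']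
    rw [List.range'_succ]
    simp only [pvFindA, hget, hdrop, List.findIdx?_cons]
    by_cases hp : ram[k] = p
    · simp [hp]
    · have hbp : (ram[k] == p) = false := by simp [hp]
      simp only [hbp, Bool.false_eq_true, if_false]
      rw [ih (k + 1) sc (by omega)]
      cases hfi : (ram.drop (k + 1)).findIdx? (fun x => x == p) with
      | none => simp
      | some j =>
        simp only [Option.map_some]
        have : k + 1 + j = k + (j + 1) := by omega
        rw [this]

theorem rotate_shift {α : Type} (z : List α) (ptr : Nat) (e : α) (h : ptr < z.length) :
    (z.rotate ptr).tail ++ [e] = (z.set ptr e).rotate ((ptr + 1) % z.length) := by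
  have htake : (z.take ptr).length = ptr := by simp [List.length_take]; omega
  have hz' : z.set ptr e = z.take ptr ++ e :: z.drop (ptr + 1) := by
    rw [List.set_eq_take_append_cons_drop]; simp [h]
  have hLHS : (z.rotate ptr).tail ++ [e] = z.drop (ptr + 1) ++ (z.take ptr ++ [e]) := by
    rw [List.rotate_eq_drop_append_take (Nat.le_of_lt h), ← List.getElem_cons_drop h,
        List.cons_append, List.tail_cons, List.append_assoc]
  rcases Nat.lt_or_ge (ptr + 1) z.length with hlt | hge
  · rw [Nat.mod_eq_of_lt hlt, hLHS, hz',
        List.rotate_eq_drop_append_take (by simp [List.length_take, List.length_drop]; omega)]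
    rw [List.drop_append, List.take_append, htake]
    have h1 : ptr + 1 - ptr = 1 := by omega
    have h2 : (z.take ptr).drop (ptr + 1) = [] := List.drop_eq_nil_of_le (by omega)
    rw [h1, h2]
    simp
  · have hmod : (ptr + 1) % z.length = 0 := by
      have hptr : ptr + 1 = z.length := by omega
      rw [hptr, Nat.mod_self]
    have hdropnil : z.drop (ptr + 1) = [] := List.drop_eq_nil_of_le (by omega)
    rw [hmod, List.rotate_zero, hLHS, hz', hdropnil]
    simp

theorem zip_set_sc (ram sc : List Int) (i : Nat) (v : Int)
    (hlen : sc.length = ram.length) (hi : i < ram.length) :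
    ram.zip (sc.set i v) = (ram.zip sc).set i (ram[i], v) := by
  apply List.ext_getElem
  · simp [List.length_zip, hlen]
  · intro j h1 h2
    have hj : j < ram.length := by simp [List.length_zip, hlen] at h1; omega
    have hjs : j < sc.length := by omega
    rw [List.getElem_zip, List.getElem_set, List.getElem_set, List.getElem_zip]
    by_cases hji : i = j
    · subst hji; simp
    · simp [hji]

theorem zip_set_ram (ram sc : List Int) (i : Nat) (v : Int)
    (hlen : sc.length = ram.length) (hi : i < ram.length) :
    (ram.set i v).zip sc = (ram.zip sc).set i (v, sc[i]) := by
  apply List.ext_getElem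
  · simp [List.length_zip, hlen]
  · intro j h1 h2
    have hj : j < ram.length := by simp [List.length_zip, hlen] at h1; omega
    rw [List.getElem_zip, List.getElem_set, List.getElem_set, List.getElem_zip]
    by_cases hji : i = j
    · subst hji; simp
    · simp [hji]

theorem countP_zip_fst (ram sc : List Int) (p : Int) (hlen : sc.length = ram.length) :
    (ram.zip sc).countP (fun c => c.1 == p) = ram.countP (fun x => x == p) := by
  have h : (ram.zip sc).map Prod.fst = ram := List.map_fst_zip (by omega)
  conv_rhs => rw [← h]
  rw [List.countP_map]
  rfl

theorem hitB_fst (p : Int) : ∀ l, (pvHitB p l).1 = l.any (fun c => c.1 == p) := by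
  intro l
  induction l with
  | nil => simp [pvHitB]
  | cons c t ih =>
    simp only [pvHitB, List.any_cons]
    by_cases h : c.1 = p
    · simp [h]
    · have hb : (c.1 == p) = false := by simp [h]
      simp [hb, ih]

theorem hitB_snd (p : Int) : ∀ l, l.countP (fun c => c.1 == p) ≤ 1 →
    (pvHitB p l).2 = l.map (fun c => if c.1 == p then (c.1, 1) else c) := by
  intro l
  induction l with
  | nil => simp [pvHitB]
  | cons c t ih =>
    intro hc
    rw [List.countP_cons] at hc
    by_cases h : c.1 = p
    · have hb : (c.1 == p) = true := by simp [h]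
      have ht : t.countP (fun c => c.1 == p) = 0 := by
        rw [hb, if_pos rfl] at hc; omega
      have hno : ∀ x ∈ t, ¬ (x.1 == p) = true := List.countP_eq_zero.mp ht
      have hmap : t.map (fun c => if c.1 == p then (c.1, 1) else c) = t := by
        rw [List.map_congr_left (g := id) (fun x hx => by simp [hno x hx]), List.map_id]
      simp only [pvHitB]
      rw [if_pos hb, List.map_cons, hmap]
      simp [h]
    · have hb : (c.1 == p) = false := by simp [h]
      have ht : t.countP (fun c => c.1 == p) ≤ 1 := by
        rw [hb] at hc; rw [if_neg (by simp)] at hc; omega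
      simp only [pvHitB]
      rw [if_neg (by simp [h]), List.map_cons]
      simp only [ih ht]
      simp [h]

theorem pymod_succ (frames ptr : Int) (h1 : 1 ≤ frames) (h2 : 0 ≤ ptr) (h3 : ptr < frames) :
    PySem.Int.mod (ptr + 1) frames = (((ptr.toNat + 1) % frames.toNat : Nat) : Int) := by
  rw [PySem.Int.mod_eq_emod_of_pos (by omega)]
  by_cases hlt : ptr + 1 < frames
  · rw [Int.emod_eq_of_lt (by omega) hlt, Nat.mod_eq_of_lt (by omega)]
    omega
  · have he : ptr + 1 = frames := by omega
    have hn : ptr.toNat + 1 = frames.toNat := by omega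
    rw [he, Int.emod_self, hn, Nat.mod_self]
    simp

theorem pymod_bounds (frames ptr : Int) (h1 : 1 ≤ frames) (h2 : 0 ≤ ptr) (h3 : ptr < frames) :
    0 ≤ PySem.Int.mod (ptr + 1) frames ∧ PySem.Int.mod (ptr + 1) frames < frames ∧
    (PySem.Int.mod (ptr + 1) frames).toNat = (ptr.toNat + 1) % frames.toNat := by
  have hF : (frames.toNat : Int) = frames := Int.toNat_of_nonneg (by omega)
  rw [pymod_succ frames ptr h1 h2 h3]
  have hlt : (ptr.toNat + 1) % frames.toNat < frames.toNat := Nat.mod_lt _ (by omega)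
  refine ⟨by positivity, ?_, by exact Int.toNat_natCast _⟩
  have hlt' : (((ptr.toNat + 1) % frames.toNat : Nat) : Int) < (frames.toNat : Int) := by
    exact_mod_cast hlt
  omega

theorem head_tail_rotate {α : Type} (z : List α) (P : Nat) (hP : P < z.length) :
    z.rotate P = z[P] :: (z.rotate P).tail := by
  have hne : z.rotate P ≠ [] := by
    intro hnil
    have := List.length_rotate z P
    rw [hnil] at this
    simp at this
    omega
  cases hzr : z.rotate P with
  | nil => exact absurd hzr hne
  | cons a t =>
    have h1 : (z.rotate P).head? = z[P]? := List.head?_rotate hP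
    rw [hzr, List.getElem?_eq_getElem hP] at h1
    simp only [List.head?_cons, Option.some.injEq] at h1
    simp [h1]

-- setting a fresh page into the RAM preserves "each non-sentinel page is resident at most once"
theorem countP_set_fresh (ram : List Int) (i : Nat) (p : Int) (hi : i < ram.length)
    (hfresh : ∀ x ∈ ram, x ≠ p)
    (hcnt : ∀ q, q ≠ -1 → ram.countP (fun x => x == q) ≤ 1) (hp : p ≠ -1) :
    ∀ q, q ≠ -1 → (ram.set i p).countP (fun x => x == q) ≤ 1 := by
  intro q hq
  have hset : ram.set i p = ram.take i ++ p :: ram.drop (i + 1) := by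
    rw [List.set_eq_take_append_cons_drop]; simp [hi]
  have hold : ram = ram.take i ++ ram[i] :: ram.drop (i + 1) := by
    conv_lhs => rw [← List.take_append_drop i ram, ← List.getElem_cons_drop hi]
  have hdecomp : ram.countP (fun x => x == q)
      = (ram.take i).countP (fun x => x == q) + ((if ram[i] = q then 1 else 0) + (ram.drop (i + 1)).countP (fun x => x == q)) := by
    conv_lhs => rw [hold]
    rw [List.countP_append, List.countP_cons]
    by_cases h : ram[i] = q <;> simp [h] <;> omega
  have hnew : (ram.set i p).countP (fun x => x == q)
      = (ram.take i).countP (fun x => x == q) + ((if p = q then 1 else 0) + (ram.drop (i + 1)).countP (fun x => x == q)) := by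
    rw [hset, List.countP_append, List.countP_cons]
    by_cases h : p = q <;> simp [h] <;> omega
  have hq1 := hcnt q hq
  by_cases hpq : p = q
  · subst hpq
    have h0 : ram.countP (fun x => x == p) = 0 :=
      List.countP_eq_zero.mpr (fun x hx => by simp [hfresh x hx])
    rw [h0] at hdecomp
    rw [if_pos rfl] at hnew
    by_cases hri : ram[i] = p <;> simp only [hri, if_pos rfl, if_true] at hdecomp <;> omega
  · rw [if_neg hpq] at hnew
    omega

theorem replace_rel (p frames : Int) (hf : 1 ≤ frames) (hp : p ≠ -1) :
    ∀ (fuel : Nat) (ram sc : List Int) (ptr : Int),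
    ram.length = frames.toNat → sc.length = frames.toNat →
    0 ≤ ptr → ptr < frames → (∀ x ∈ sc, x = 0 ∨ x = 1) →
    (∀ x ∈ ram, x ≠ p) →
    (∀ q, q ≠ -1 → ram.countP (fun x => x == q) ≤ 1) →
    sc.countP (fun x => x != 0) < fuel →
    (pvReplaceA p frames ram sc ptr fuel).1.length = frames.toNat ∧
    (pvReplaceA p frames ram sc ptr fuel).2.1.length = frames.toNat ∧
    0 ≤ (pvReplaceA p frames ram sc ptr fuel).2.2 ∧
    (pvReplaceA p frames ram sc ptr fuel).2.2 < frames ∧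
    (∀ x ∈ (pvReplaceA p frames ram sc ptr fuel).2.1, x = 0 ∨ x = 1) ∧
    (∀ q, q ≠ -1 → (pvReplaceA p frames ram sc ptr fuel).1.countP (fun x => x == q) ≤ 1) ∧
    pvEvictB ((ram.zip sc).rotate ptr.toNat) fuel ++ [(p, 0)] =
      ((pvReplaceA p frames ram sc ptr fuel).1.zip (pvReplaceA p frames ram sc ptr fuel).2.1).rotate
        (pvReplaceA p frames ram sc ptr fuel).2.2.toNat := by
  intro fuel
  induction fuel with
  | zero => intro ram sc ptr _ _ _ _ _ _ _ hfu; omega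
  | succ fuel ih =>
    intro ram sc ptr hram hsc hp0 hpf hbits hfresh hcnt hfu
    have hF : (frames.toNat : Int) = frames := Int.toNat_of_nonneg (by omega)
    set P := ptr.toNat with hPdef
    have hP : P < frames.toNat := by omega
    have hPsc : P < sc.length := by omega
    have hPram : P < ram.length := by omega
    have hzlen : (ram.zip sc).length = frames.toNat := by
      simp [List.length_zip]; omega
    have hPz : P < (ram.zip sc).length := by omega
    have hguard : PySem.List.pyGetD sc ptr 0 = sc[P] :=
      PySem.List.pyGetD_eq_getElem sc 0 hp0 (by omega)
    have hqcons : (ram.zip sc).rotate P = (ram.zip sc)[P] :: ((ram.zip sc).rotate P).tail :=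
      head_tail_rotate _ _ hPz
    have hentry : (ram.zip sc)[P] = (ram[P], sc[P]) := List.getElem_zip
    have hmod := pymod_succ frames ptr hf hp0 hpf
    obtain ⟨hb0, hb1, hb2⟩ := pymod_bounds frames ptr hf hp0 hpf
    by_cases hbit : sc[P] = 0
    · -- bit clear: replace here / evict the front cell
      have hA : pvReplaceA p frames ram sc ptr (fuel + 1)
          = (ram.set P p, sc, PySem.Int.mod (ptr + 1) frames) := by
        simp only [pvReplaceA, hguard, hbit]
        simp [hPdef]
      have hB : pvEvictB ((ram.zip sc).rotate P) (fuel + 1)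
          = ((ram.zip sc).rotate P).tail := by
        conv_lhs => rw [hqcons]
        simp only [pvEvictB, hentry]
        simp [hbit]
      rw [hA, hB]
      refine ⟨by simp [hram], hsc, hb0, hb1, hbits,
        countP_set_fresh ram P p hPram hfresh hcnt hp, ?_⟩
      · rw [hb2]
        have hset : (ram.set P p).zip sc = (ram.zip sc).set P (p, 0) := by
          rw [zip_set_ram ram sc P p (by omega) hPram, hbit]
        rw [hset, ← hzlen]
        exact rotate_shift (ram.zip sc) P (p, 0) hPz
    · -- bit set: clear it and advance
      have hbit1 : sc[P] = 1 := by
        rcases hbits sc[P] (List.getElem_mem hPsc) with h | h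
        · omega
        · exact h
      have hA : pvReplaceA p frames ram sc ptr (fuel + 1)
          = pvReplaceA p frames ram (sc.set P 0) (PySem.Int.mod (ptr + 1) frames) fuel := by
        simp only [pvReplaceA, hguard, hbit1]
        simp [hPdef]
      have hB : pvEvictB ((ram.zip sc).rotate P) (fuel + 1)
          = pvEvictB (((ram.zip sc).rotate P).tail ++ [(ram[P], 0)]) fuel := by
        conv_lhs => rw [hqcons]
        simp only [pvEvictB, hentry]
        simp [hbit1]
      have hq2 : ((ram.zip sc).rotate P).tail ++ [(ram[P], 0)]
          = (ram.zip (sc.set P 0)).rotate ((P + 1) % frames.toNat) := by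
        rw [zip_set_sc ram sc P 0 (by omega) hPram, ← hzlen]
        exact rotate_shift (ram.zip sc) P (ram[P], 0) hPz
      have hcount : (sc.set P 0).countP (fun x => x != 0) < fuel := by
        have hsplit0 : sc.set P 0 = sc.take P ++ 0 :: sc.drop (P + 1) := by
          rw [List.set_eq_take_append_cons_drop]
          simp [hPsc]
        have hsplit1 : sc = sc.take P ++ sc[P] :: sc.drop (P + 1) := by
          conv_lhs => rw [← List.take_append_drop P sc, ← List.getElem_cons_drop hPsc]
        have h2 : sc.countP (fun x => x != 0)
            = (sc.take P ++ sc[P] :: sc.drop (P + 1)).countP (fun x => x != 0) := by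
          conv_lhs => rw [hsplit1]
        rw [hsplit0]
        simp only [List.countP_append, List.countP_cons, hbit1] at h2 ⊢
        simp at h2 ⊢
        omega
      have hnew := ih ram (sc.set P 0) (PySem.Int.mod (ptr + 1) frames) hram (by simp [hsc])
        hb0 hb1
        (by intro x hx
            rcases List.mem_or_eq_of_mem_set hx with h | h
            · exact hbits x h
            · left; exact h)
        hfresh hcnt hcount
      rw [hA, hB, hq2]
      rw [← hb2]
      exact hnew

-- from "at most one occurrence" and the first occurrence, every other slot misses
theorem unique_slot (ram : List Int) (p : Int) (i0 : Nat) (hi0 : i0 < ram.length)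
    (hp : ram[i0] = p) (hmin : ∀ k (hk : k < ram.length), k < i0 → ¬ ram[k] = p)
    (hcnt : ram.countP (fun x => x == p) ≤ 1) :
    ∀ j (hj : j < ram.length), j ≠ i0 → ram[j] ≠ p := by
  intro j hj hne hjp
  rcases Nat.lt_or_ge j i0 with hlt | hge
  · exact hmin j hj hlt hjp
  · have hgt : i0 < j := by omega
    have hdec : ram = ram.take (i0 + 1) ++ ram.drop (i0 + 1) := (List.take_append_drop _ _).symm
    have hm1 : ram[i0] ∈ ram.take (i0 + 1) := by
      have : (ram.take (i0 + 1))[i0]'(by simp [List.length_take]; omega) = ram[i0] :=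
        List.getElem_take
      rw [← this]; exact List.getElem_mem _
    have hm2 : ram[j] ∈ ram.drop (i0 + 1) := by
      have h' : (ram.drop (i0 + 1))[j - (i0 + 1)]'(by simp [List.length_drop]; omega) = ram[j] := by
        rw [List.getElem_drop]
        congr 1
        omega
      rw [← h']; exact List.getElem_mem _
    have hc1 : 0 < (ram.take (i0 + 1)).countP (fun x => x == p) := by
      rw [List.countP_pos_iff]; exact ⟨ram[i0], hm1, by simp [hp]⟩
    have hc2 : 0 < (ram.drop (i0 + 1)).countP (fun x => x == p) := by
      rw [List.countP_pos_iff]; exact ⟨ram[j], hm2, by simp [hjp]⟩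
    have : ram.countP (fun x => x == p)
        = (ram.take (i0 + 1)).countP (fun x => x == p) + (ram.drop (i0 + 1)).countP (fun x => x == p) := by
      conv_lhs => rw [hdec]
      rw [List.countP_append]
    omega

theorem loop_rel (ref : List Int) (frames : Int) (hf : 1 ≤ frames) :
    ∀ (m k : Nat) (ram sc : List Int) (ptr faults : Int),
    k + m ≤ ref.length →
    ram.length = frames.toNat → sc.length = frames.toNat →
    0 ≤ ptr → ptr < frames → (∀ x ∈ sc, x = 0 ∨ x = 1) →
    (∀ q, q ≠ -1 → ram.countP (fun x => x == q) ≤ 1) →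
    (∀ x ∈ (ref.drop k).take m, x ≠ -1) →
    pvLoopA ref frames (List.range' k m) ram sc ptr faults
      = pvLoopB frames ((ref.drop k).take m) ((ram.zip sc).rotate ptr.toNat) faults := by
  intro m
  induction m with
  | zero =>
    intro k ram sc ptr faults _ _ _ _ _ _ _ _
    simp [pvLoopA, pvLoopB]
  | succ m ih =>
    intro k ram sc ptr faults hk hram hsc hp0 hpf hbits hcnt hne
    have hk' : k < ref.length := by omega
    have hpage : (ref.drop k).take (m + 1) = ref[k] :: ((ref.drop (k + 1)).take m) := by
      rw [← List.getElem_cons_drop hk', List.take_succ_cons]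
    have hgetref : PySem.List.pyGetD ref ((k : Nat) : Int) 0 = ref[k] :=
      PySem.List.pyGetD_eq_getElem ref 0 (by omega) (by omega)
    have hpne : ref[k] ≠ -1 := by
      apply hne
      rw [hpage]
      exact List.mem_cons_self
    have hne' : ∀ x ∈ (ref.drop (k + 1)).take m, x ≠ -1 := by
      intro x hx
      apply hne
      rw [hpage]
      exact List.mem_cons_of_mem _ hx
    have hzlen : (ram.zip sc).length = frames.toNat := by simp [List.length_zip]; omega
    have hcntz : ((ram.zip sc).rotate ptr.toNat).countP (fun c => c.1 == ref[k]) ≤ 1 := by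
      rw [((ram.zip sc).rotate_perm ptr.toNat).countP_eq,
        countP_zip_fst ram sc ref[k] (by omega)]
      exact hcnt ref[k] hpne
    have hfind := findA_range' ref[k] ram frames.toNat 0 sc (by omega)
    simp only [List.drop_zero, Nat.zero_add] at hfind
    rw [List.range'_succ, hpage]
    simp only [pvLoopA, pvLoopB, hgetref, List.range_eq_range', hfind]
    cases hfi : ram.findIdx? (fun x => x == ref[k]) with
    | some i0 =>
      obtain ⟨hi0len, hi0p, hi0min⟩ := List.findIdx?_eq_some_iff_getElem.mp hfi
      have hi0p' : ram[i0] = ref[k] := by simpa using hi0p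
      have hi0min' : ∀ kk (hkk : kk < ram.length), kk < i0 → ¬ ram[kk] = ref[k] := by
        intro kk hkk hlt heq
        exact absurd (by simp [heq] : (ram[kk] == ref[k]) = true)
          (by simpa using hi0min kk hlt)
      have huni := unique_slot ram ref[k] i0 hi0len hi0p' hi0min' (hcnt ref[k] hpne)
      -- B finds the cell: its hit flag is true
      have hmem_z : (ram[i0], sc[i0]'(by omega)) ∈ ram.zip sc := by
        have : (ram.zip sc)[i0]'(by omega) = (ram[i0], sc[i0]'(by omega)) := List.getElem_zip
        rw [← this]; exact List.getElem_mem _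
      have hmem_q : (ram[i0], sc[i0]'(by omega)) ∈ (ram.zip sc).rotate ptr.toNat :=
        (((ram.zip sc).rotate_perm ptr.toNat).mem_iff).mpr hmem_z
      have hany : ((ram.zip sc).rotate ptr.toNat).any (fun c => c.1 == ref[k]) = true :=
        List.any_eq_true.mpr ⟨_, hmem_q, by simp [hi0p']⟩
      have hfst : (pvHitB ref[k] ((ram.zip sc).rotate ptr.toNat)).1 = true := by
        rw [hitB_fst, hany]
      -- marking the unique matching cell = setting sc[i0]
      have hmap : (ram.zip sc).map (fun c => if c.1 == ref[k] then (c.1, 1) else c)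
          = ram.zip (sc.set i0 1) := by
        apply List.ext_getElem
        · simp [List.length_zip]
        · intro j h1 h2
          have hj : j < ram.length := by simp [List.length_zip] at h1; omega
          have hjs : j < sc.length := by omega
          rw [List.getElem_map, List.getElem_zip, List.getElem_zip, List.getElem_set]
          by_cases hji : i0 = j
          · subst hji
            simp [hi0p']
          · have : (ram[j] == ref[k]) = false := by
              simp
              exact huni j hj (by omega)
            simp [this, hji]
      have hsnd : (pvHitB ref[k] ((ram.zip sc).rotate ptr.toNat)).2
          = (ram.zip (sc.set i0 1)).rotate ptr.toNat := by
        rw [hitB_snd ref[k] _ hcntz, List.map_rotate, hmap]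
      rw [hfst]
      simp only [if_true, hsnd]
      exact ih (k + 1) ram (sc.set i0 1) ptr faults (by omega) hram (by simp [hsc]) hp0 hpf
        (by intro x hx
            rcases List.mem_or_eq_of_mem_set hx with h | h
            · exact hbits x h
            · right; exact h)
        hcnt hne'
    | none =>
      have hnone : ∀ x ∈ ram, (x == ref[k]) = false := List.findIdx?_eq_none_iff.mp hfi
      have hfresh : ∀ x ∈ ram, x ≠ ref[k] := by
        intro x hx heq
        have := hnone x hx
        simp [heq] at this
      have hanyf : ((ram.zip sc).rotate ptr.toNat).any (fun c => c.1 == ref[k]) = false := by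
        rw [List.any_eq_false]
        intro c hc
        obtain ⟨a, b⟩ := c
        have hcz : (a, b) ∈ ram.zip sc := (((ram.zip sc).rotate_perm ptr.toNat).mem_iff).mp hc
        have ha : a ∈ ram := (List.of_mem_zip hcz).1
        simp [hfresh a ha]
      have hfst : (pvHitB ref[k] ((ram.zip sc).rotate ptr.toNat)).1 = false := by
        rw [hitB_fst, hanyf]
      have hsnd : (pvHitB ref[k] ((ram.zip sc).rotate ptr.toNat)).2
          = (ram.zip sc).rotate ptr.toNat := by
        rw [hitB_snd ref[k] _ hcntz]
        have : ∀ c ∈ (ram.zip sc).rotate ptr.toNat, ¬ (c.1 == ref[k]) = true := by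
          intro c hc
          rw [List.any_eq_false] at hanyf
          exact fun h => hanyf c hc h
        rw [List.map_congr_left (g := id) (fun c hc => by simp [this c hc]), List.map_id]
      have hrr := replace_rel ref[k] frames hf hpne (frames.toNat + 1) ram sc ptr hram hsc
        hp0 hpf hbits hfresh hcnt
        (by have := List.countP_le_length (p := fun x => x != 0) (l := sc); omega)
      obtain ⟨h1, h2, h3, h4, h5, h6, h7⟩ := hrr
      rw [hfst]
      simp only [Bool.false_eq_true, if_false, hsnd, h7]
      exact ih (k + 1) (pvReplaceA ref[k] frames ram sc ptr (frames.toNat + 1)).1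
        (pvReplaceA ref[k] frames ram sc ptr (frames.toNat + 1)).2.1
        (pvReplaceA ref[k] frames ram sc ptr (frames.toNat + 1)).2.2 (faults + 1)
        (by omega) h1 h2 h3 h4 h5 h6 hne'

-- ===== VERDICT (by name: the statement is the Claim_ definition above) =====
theorem page_faults_by_SC_py_spec : Claim_equal_page_faults_by_SC_py := by
  unfold Claim_equal_page_faults_by_SC_py
  intro ref n frames _ hPre
  unfold Spec_page_faults_by_SC_py page_faults_by_SC_py page_faults_by_SC_py_alt
  by_cases hn : n ≤ 0
  · have h1 : n.toNat = 0 := by omega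
    have h2 : max 0 n = 0 := by omega
    rw [h1, h2, PySem.List.slice_to ref (by omega)]
    simp [pvLoopA, pvLoopB]
  · rcases hPre with h | ⟨hlen, hfr, hneg⟩
    · omega
    have hmax : max 0 n = n := by omega
    rw [hmax, PySem.List.slice_to ref (by omega)]
    have hzip : List.replicate frames.toNat ((-1 : Int), (0 : Int))
        = (List.replicate frames.toNat (-1 : Int)).zip (List.replicate frames.toNat (0 : Int)) := by
      rw [List.zip_replicate]
      simp
    have hloop := loop_rel ref frames hfr n.toNat 0 (List.replicate frames.toNat (-1))
      (List.replicate frames.toNat 0) 0 0 (by omega) (by simp) (by simp) (by omega) (by omega)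
      (by intro x hx; left; exact List.eq_of_mem_replicate hx)
      (by intro q hq
          have : (List.replicate frames.toNat (-1 : Int)).countP (fun x => x == q) = 0 :=
            List.countP_eq_zero.mpr (fun x hx => by
              have hx1 : x = -1 := List.eq_of_mem_replicate hx
              subst hx1
              simp only [beq_iff_eq]
              omega)
          omega)
      (by simpa using hneg)
    rw [List.range_eq_range', hloop]
    rw [List.drop_zero, hzip]
    simp
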